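-- pv_equiv track=rewrite | github.com/Cigam-HFden/Manim-Dynamic-Table-Code | codeBase/dep.py | getListGroupAfterInsert
-- ===== SOURCE A (Python) =====
-- def getListInsertCount(
-- 	locList :list,
-- ) -> list:
-- 	locLen :int= len(locList)
-- 	retList :list= []
-- 	cntList :int= 1
-- 	for i in range(1,locLen):
-- 		if locList[i] == locList[i-1]:
-- 			cntList += 1
-- 		elif locList[i] > locList[i-1]:
-- 			retList.append([locList[i-1],cntList])
-- 			cntList = 1
-- 	retList.append([locList[locLen-1],cntList])
-- 	return retList
-- 	pass
--
-- def getListInsertOffset(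
-- 	newLocList :list,
-- ) -> list:
-- 	retList :list= []
-- 	adderTo :int= 0
-- 	for i in range(len(newLocList)):
-- 		retList.append([
-- 			newLocList[i][0]+adderTo,
-- 			newLocList[i][0]+adderTo+newLocList[i][1]
-- 			])
-- 		adderTo += newLocList[i][1]
-- 	return retList
-- 	pass
--
-- def getListGroupAfterInsert(
-- 	finalList :list,
-- 	locateIdx :list[int],
-- ) -> list:
-- 	finLen :int= len(finalList)
-- 	locLen :int= len(locateIdx)
-- 	oriLen :int= finLen - locLen
-- 	oriList :list= []
-- 	insList :list= []
-- 	newLoc :list= getListInsertCount(locateIdx)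
-- 	newLen :int= len(newLoc)
-- 	preAdd :bool= True if newLoc[0][0] == 0 else False
-- 	posAdd :bool= True if newLoc[newLen-1][0] >= oriLen else False
-- 	offLoc :list= getListInsertOffset(newLoc)
-- 	offLen :int= len(offLoc)
--
-- 	for i in range(offLen):
-- 		insList.append(finalList[
-- 			offLoc[i][0]:offLoc[i][1]
-- 		])
--
-- 	if preAdd == False:
-- 		oriList.append(finalList[
-- 			0:offLoc[0][0]
-- 		])
-- 	for i in range(offLen-1):
-- 		oriList.append(finalList[
-- 			offLoc[i][1]:offLoc[i+1][0]
-- 		])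
-- 	if posAdd == False:
-- 		oriList.append(finalList[
-- 			offLoc[offLen-1][1]:finLen
-- 		])
--
-- 	return [oriList,insList,preAdd,posAdd]
-- 	pass
-- ===== SOURCE B (Python) =====
-- def getListGroupAfterInsert(finalList, locateIdx):
--     finLen = len(finalList)
--     oriLen = finLen - len(locateIdx)
--     # one scan over adjacent pairs: build the flat list of cut points of finalList
--     cuts = [0]
--     cnt = 1
--     added = 0
--     for prev, cur in zip(locateIdx, locateIdx[1:]):
--         if cur == prev:
--             cnt += 1
--         elif cur > prev:
--             cuts.append(prev + added)
--             cuts.append(prev + added + cnt)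
--             added += cnt
--             cnt = 1
--     last = locateIdx[-1]
--     cuts.append(last + added)
--     cuts.append(last + added + cnt)
--     cuts.append(finLen)
--     # partition finalList at the cut points and deal the slices alternately
--     pieces = [finalList[s:e] for s, e in zip(cuts, cuts[1:])]
--     oriList = []
--     insList = []
--     takeOri = True
--     for piece in pieces:
--         if takeOri:
--             oriList.append(piece)
--         else:
--             insList.append(piece)
--         takeOri = not takeOri
--     preAdd = cuts[1] == 0
--     posAdd = last >= oriLen
--     if preAdd:
--         oriList = oriList[1:]
--     if posAdd:
--         oriList = oriList[:-1]
--     return [oriList, insList, preAdd, posAdd]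
-- ===== Notes on version B (the rewrite author's own statement) =====
-- stated objective: alternative
-- what changed: B replaces A's pipeline (grouping helper, separate offset-table helper, then three slicing loops with head/tail conditionals) by one scan over adjacent pairs that emits a flat list of cut points, partitions finalList by slicing consecutive cut points, and deals the pieces alternately to ori/ins with a head/tail trim.
import Mathlib
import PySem

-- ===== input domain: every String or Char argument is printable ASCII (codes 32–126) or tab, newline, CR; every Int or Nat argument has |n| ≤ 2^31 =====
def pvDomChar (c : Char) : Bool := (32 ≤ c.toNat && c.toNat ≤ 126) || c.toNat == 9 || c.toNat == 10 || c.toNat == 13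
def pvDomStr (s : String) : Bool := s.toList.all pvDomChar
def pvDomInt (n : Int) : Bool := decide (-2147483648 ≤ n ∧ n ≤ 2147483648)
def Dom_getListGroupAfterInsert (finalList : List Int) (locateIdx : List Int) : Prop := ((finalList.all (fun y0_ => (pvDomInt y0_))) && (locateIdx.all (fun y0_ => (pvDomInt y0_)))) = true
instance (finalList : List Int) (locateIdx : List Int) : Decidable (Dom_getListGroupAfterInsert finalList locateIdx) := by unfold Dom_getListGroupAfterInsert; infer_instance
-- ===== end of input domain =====

-- B replaces A's pipeline (grouping helper, offset-table helper, three slicing loops) by one scan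
-- that emits a flat list of cut points, a cut-point partition of finalList, and an alternating deal
-- of the pieces with head/tail trimming (objective: alternative).
-- Both programs raise IndexError on empty locateIdx; Pre_ excludes exactly that.

-- ===== PORT A =====
-- getListInsertCount
def pvGetListInsertCount (locList : List Int) : List (Int × Int) :=
  let locLen := locList.length
  let st := (PySem.List.pyRange 1 locLen 1).foldl
    (fun (st : List (Int × Int) × Int) i =>
      if PySem.List.pyGetD locList i 0 = PySem.List.pyGetD locList (i - 1) 0 then
        (st.1, st.2 + 1)
      else if PySem.List.pyGetD locList i 0 > PySem.List.pyGetD locList (i - 1) 0 then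
        (st.1 ++ [(PySem.List.pyGetD locList (i - 1) 0, st.2)], 1)
      else st) ([], 1)
  st.1 ++ [(PySem.List.pyGetD locList ((locLen : Int) - 1) 0, st.2)]

-- getListInsertOffset
def pvGetListInsertOffset (newLocList : List (Int × Int)) : List (Int × Int) :=
  ((PySem.List.pyRange 0 newLocList.length 1).foldl
    (fun (st : List (Int × Int) × Int) i =>
      let p := PySem.List.pyGetD newLocList i (0, 0)
      (st.1 ++ [(p.1 + st.2, p.1 + st.2 + p.2)], st.2 + p.2)) ([], 0)).1

def getListGroupAfterInsert (finalList : List Int) (locateIdx : List Int) : List (List Int) × List (List Int) × Bool × Bool :=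
  let finLen := finalList.length
  let locLen := locateIdx.length
  let oriLen : Int := (finLen : Int) - (locLen : Int)
  let newLoc := pvGetListInsertCount locateIdx
  let newLen := newLoc.length
  let preAdd : Bool := if (PySem.List.pyGetD newLoc 0 (0, 0)).1 = 0 then true else false
  let posAdd : Bool := if (PySem.List.pyGetD newLoc ((newLen : Int) - 1) (0, 0)).1 ≥ oriLen then true else false
  let offLoc := pvGetListInsertOffset newLoc
  let offLen := offLoc.length
  let insList := (PySem.List.pyRange 0 offLen 1).foldl
    (fun acc i => acc ++ [PySem.List.slice finalList (some (PySem.List.pyGetD offLoc i (0, 0)).1) (some (PySem.List.pyGetD offLoc i (0, 0)).2)]) []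
  let ori1 : List (List Int) := if preAdd = false then
    [PySem.List.slice finalList (some 0) (some (PySem.List.pyGetD offLoc 0 (0, 0)).1)] else []
  let ori2 := (PySem.List.pyRange 0 ((offLen : Int) - 1) 1).foldl
    (fun acc i => acc ++ [PySem.List.slice finalList (some (PySem.List.pyGetD offLoc i (0, 0)).2) (some (PySem.List.pyGetD offLoc (i + 1) (0, 0)).1)]) []
  let ori3 : List (List Int) := if posAdd = false then
    [PySem.List.slice finalList (some (PySem.List.pyGetD offLoc ((offLen : Int) - 1) (0, 0)).2) (some (finLen : Int))] else []
  (ori1 ++ ori2 ++ ori3, insList, preAdd, posAdd)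

-- ===== PORT B =====
def getListGroupAfterInsert_alt (finalList : List Int) (locateIdx : List Int) : List (List Int) × List (List Int) × Bool × Bool :=
  let finLen := finalList.length
  let oriLen : Int := (finLen : Int) - (locateIdx.length : Int)
  let st := (locateIdx.zip (PySem.List.slice locateIdx (some 1) none)).foldl
    (fun (st : List Int × Int × Int) pc =>
      if pc.2 = pc.1 then (st.1, st.2.1 + 1, st.2.2)
      else if pc.2 > pc.1 then
        (st.1 ++ [pc.1 + st.2.2, pc.1 + st.2.2 + st.2.1], 1, st.2.2 + st.2.1)
      else st) ([0], 1, 0)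
  let last := PySem.List.pyGetD locateIdx (-1) 0
  let cuts := st.1 ++ [last + st.2.2, last + st.2.2 + st.2.1, (finLen : Int)]
  let pieces := (cuts.zip (PySem.List.slice cuts (some 1) none)).map
    (fun p => PySem.List.slice finalList (some p.1) (some p.2))
  let oi := pieces.foldl
    (fun (st : List (List Int) × List (List Int) × Bool) p =>
      if st.2.2 then (st.1 ++ [p], st.2.1, false) else (st.1, st.2.1 ++ [p], true))
    ([], [], true)
  let preAdd : Bool := decide (PySem.List.pyGetD cuts 1 0 = 0)
  let posAdd : Bool := decide (last ≥ oriLen)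
  let ori1 := if preAdd then PySem.List.slice oi.1 (some 1) none else oi.1
  let ori2 := if posAdd then PySem.List.slice ori1 none (some (-1)) else ori1
  (ori2, oi.2.1, preAdd, posAdd)

-- ===== PRECONDITION & SPEC =====
-- Both A and B raise IndexError when locateIdx is empty; Pre_ excludes exactly that input.
def Pre_getListGroupAfterInsert (finalList : List Int) (locateIdx : List Int) : Prop := locateIdx ≠ []
instance (finalList : List Int) (locateIdx : List Int) : Decidable (Pre_getListGroupAfterInsert finalList locateIdx) := by unfold Pre_getListGroupAfterInsert; infer_instance
def pvWitness_getListGroupAfterInsert : List Int × List Int := ([1, 2, 3], [0])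

def Spec_getListGroupAfterInsert (finalList : List Int) (locateIdx : List Int) (out : List (List Int) × List (List Int) × Bool × Bool) : Prop := out = getListGroupAfterInsert_alt finalList locateIdx
instance (finalList : List Int) (locateIdx : List Int) (out : List (List Int) × List (List Int) × Bool × Bool) : Decidable (Spec_getListGroupAfterInsert finalList locateIdx out) := by unfold Spec_getListGroupAfterInsert; infer_instance

-- ===== CLAIM (what is proved, stated in full; the proofs are below) =====
def Claim_equal_getListGroupAfterInsert : Prop := ∀ (finalList : List Int) (locateIdx : List Int), Dom_getListGroupAfterInsert finalList locateIdx → Pre_getListGroupAfterInsert finalList locateIdx → Spec_getListGroupAfterInsert finalList locateIdx (getListGroupAfterInsert finalList locateIdx)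

-- ===== LEMMAS AND PROOFS =====

-- proof-side: A's grouping scan rewritten over adjacent pairs
def pvGroupsZip (locateIdx : List Int) : List (Int × Int) :=
  let st := (locateIdx.zip (PySem.List.slice locateIdx (some 1) none)).foldl
    (fun (st : List (Int × Int) × Int) pc =>
      if pc.2 = pc.1 then (st.1, st.2 + 1)
      else if pc.2 > pc.1 then (st.1 ++ [(pc.1, st.2)], 1)
      else st) ([], 1)
  st.1 ++ [(PySem.List.pyGetD locateIdx (-1) 0, st.2)]

-- offset table of a group list, as a structural recursion
def pvOffs : List (Int × Int) → Int → List (Int × Int)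
  | [], _ => []
  | (v, c) :: r, a => (v + a, v + a + c) :: pvOffs r (a + c)

-- flatten an offset list into the flat cut-point list
def pvFlat : List (Int × Int) → List Int
  | [] => []
  | (s, e) :: r => s :: e :: pvFlat r

-- the gap slices between consecutive insertion intervals
def pvGaps (fl : List Int) : Int → List (Int × Int) → List (List Int)
  | _, [] => []
  | cur, (s, e) :: r => PySem.List.slice fl (some cur) (some s) :: pvGaps fl e r

def pvEnd : Int → List (Int × Int) → Int
  | cur, [] => cur
  | _, (_, e) :: r => pvEnd e r

lemma pv_adjMap {a : Type} (xs : List a) (d : a) :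
    (List.range (xs.length - 1)).map (fun k => (xs.getD k d, xs.getD (k + 1) d)) = xs.zip xs.tail := by
  apply List.ext_getElem
  · simp
  · intro k h1 h2
    simp at h1 ⊢
    rw [List.getElem?_eq_getElem (by omega), List.getElem?_eq_getElem (by omega)]
    exact ⟨rfl, rfl⟩

-- locList[locLen-1] and locList[-1] read the same element of a nonempty list
lemma pv_getD_last {a : Type} (xs : List a) (d : a) (h : xs ≠ []) :
    PySem.List.pyGetD xs ((xs.length : Int) - 1) d = PySem.List.pyGetD xs (-1) d := by
  rw [PySem.List.pyGetD_neg_one (d := d) xs h]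
  have e3 : ((xs.length : Int) - 1) = ((xs.length - 1 : Nat) : Int) := by
    have := List.length_pos_iff.mpr h; omega
  rw [e3, PySem.List.pyGetD_natCast,
    List.getD_eq_getElem _ _ (by have := List.length_pos_iff.mpr h; omega),
    List.getLast_eq_getElem]

lemma pv_groups_eq (xs : List Int) (h : xs ≠ []) : pvGetListInsertCount xs = pvGroupsZip xs := by
  unfold pvGetListInsertCount pvGroupsZip
  simp only [PySem.List.slice_from_one]
  rw [← pv_adjMap xs 0, List.foldl_map]
  rw [PySem.List.pyRange_one, List.foldl_map]
  have hn : (((xs.length : Nat) : Int) - 1).toNat = xs.length - 1 := by omega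
  rw [hn]
  have hfold := PySem.List.foldl_congr_mem'
    (l := List.range (xs.length - 1)) (init := (([], 1) : List (Int × Int) × Int))
    (f := fun (st : List (Int × Int) × Int) (k : Nat) =>
      if PySem.List.pyGetD xs (1 + (k : Int)) 0 = PySem.List.pyGetD xs (1 + (k : Int) - 1) 0 then
        (st.1, st.2 + 1)
      else if PySem.List.pyGetD xs (1 + (k : Int)) 0 > PySem.List.pyGetD xs (1 + (k : Int) - 1) 0 then
        (st.1 ++ [(PySem.List.pyGetD xs (1 + (k : Int) - 1) 0, st.2)], 1)
      else st)
    (g := fun (st : List (Int × Int) × Int) (k : Nat) =>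
      if xs.getD (k + 1) 0 = xs.getD k 0 then (st.1, st.2 + 1)
      else if xs.getD (k + 1) 0 > xs.getD k 0 then (st.1 ++ [(xs.getD k 0, st.2)], 1)
      else st)
    (by
      intro k hk st
      have e1 : (1 : Int) + (k : Int) = ((k + 1 : Nat) : Int) := by push_cast; ring
      simp only [e1, PySem.List.pyGetD_natCast]
      have e2 : ((k + 1 : Nat) : Int) - 1 = ((k : Nat) : Int) := by push_cast; ring
      simp only [e2, PySem.List.pyGetD_natCast])
  rw [hfold, pv_getD_last xs 0 h]

lemma pv_offs_append (l : List (Int × Int)) (v c : Int) : ∀ a : Int,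
    pvOffs (l ++ [(v, c)]) a
      = pvOffs l a ++ [(v + (a + (l.map Prod.snd).sum), v + (a + (l.map Prod.snd).sum) + c)] := by
  induction l with
  | nil => intro a; simp [pvOffs]
  | cons p r ih =>
    intro a
    obtain ⟨w, d⟩ := p
    simp only [List.cons_append, pvOffs, ih, List.map_cons, List.sum_cons]
    simp [add_assoc]

lemma pv_flat_append (l1 l2 : List (Int × Int)) : pvFlat (l1 ++ l2) = pvFlat l1 ++ pvFlat l2 := by
  induction l1 with
  | nil => simp [pvFlat]
  | cons p r ih => obtain ⟨s, e⟩ := p; simp [pvFlat, ih]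

-- simulation: B's cut-point scan tracks A's grouping scan
lemma pv_sim (L : List (Int × Int)) : ∀ (gs : List (Int × Int)) (cnt : Int),
    L.foldl (fun (st : List Int × Int × Int) pc =>
        if pc.2 = pc.1 then (st.1, st.2.1 + 1, st.2.2)
        else if pc.2 > pc.1 then
          (st.1 ++ [pc.1 + st.2.2, pc.1 + st.2.2 + st.2.1], 1, st.2.2 + st.2.1)
        else st)
      ((0 : Int) :: pvFlat (pvOffs gs 0), cnt, (gs.map Prod.snd).sum)
      = ((0 : Int) :: pvFlat (pvOffs (L.foldl (fun (st : List (Int × Int) × Int) pc =>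
            if pc.2 = pc.1 then (st.1, st.2 + 1)
            else if pc.2 > pc.1 then (st.1 ++ [(pc.1, st.2)], 1)
            else st) (gs, cnt)).1 0),
         (L.foldl (fun (st : List (Int × Int) × Int) pc =>
            if pc.2 = pc.1 then (st.1, st.2 + 1)
            else if pc.2 > pc.1 then (st.1 ++ [(pc.1, st.2)], 1)
            else st) (gs, cnt)).2,
         ((L.foldl (fun (st : List (Int × Int) × Int) pc =>
            if pc.2 = pc.1 then (st.1, st.2 + 1)
            else if pc.2 > pc.1 then (st.1 ++ [(pc.1, st.2)], 1)
            else st) (gs, cnt)).1.map Prod.snd).sum) := by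
  induction L with
  | nil => intro gs cnt; rfl
  | cons pc r ih =>
    intro gs cnt
    by_cases h1 : pc.2 = pc.1
    · simp only [List.foldl_cons, if_pos h1]; exact ih gs (cnt + 1)
    · by_cases h2 : pc.2 > pc.1
      · simp only [List.foldl_cons, if_neg h1, if_pos h2]
        have := ih (gs ++ [(pc.1, cnt)]) 1
        rw [pv_offs_append gs pc.1 cnt 0, pv_flat_append] at this
        simp only [pvFlat, zero_add, List.map_append, List.sum_append, List.map_cons,
          List.sum_cons, List.map_nil, List.sum_nil, List.cons_append, add_zero] at this ⊢
        rw [← this]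
      · simp only [List.foldl_cons, if_neg h1, if_neg h2]; exact ih gs cnt

-- dealing the pieces of a cut-point list: gaps go left, insertion intervals go right
lemma pv_deal_pieces (fl : List Int) (offs : List (Int × Int)) : ∀ (c0 fin : Int) (o i : List (List Int)),
    ((((c0 :: (pvFlat offs ++ [fin])).zip (pvFlat offs ++ [fin])).map
        (fun p => PySem.List.slice fl (some p.1) (some p.2))).foldl
      (fun (st : List (List Int) × List (List Int) × Bool) p =>
        if st.2.2 then (st.1 ++ [p], st.2.1, false) else (st.1, st.2.1 ++ [p], true))
      (o, i, true))
      = (o ++ pvGaps fl c0 offs ++ [PySem.List.slice fl (some (pvEnd c0 offs)) (some fin)],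
         i ++ offs.map (fun p => PySem.List.slice fl (some p.1) (some p.2)), false) := by
  induction offs with
  | nil => intro c0 fin o i; simp [pvFlat, pvGaps, pvEnd]
  | cons q r ih =>
    intro c0 fin o i
    obtain ⟨s, e⟩ := q
    simp only [pvFlat, List.cons_append, List.zip_cons_cons, List.map_cons, List.foldl_cons,
      pvGaps, pvEnd]
    exact (ih e fin (o ++ [PySem.List.slice fl (some c0) (some s)])
        (i ++ [PySem.List.slice fl (some s) (some e)])).trans (by simp [List.append_assoc])

lemma pv_gaps_zip (fl : List Int) (rest : List (Int × Int)) : ∀ (p : Int × Int),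
    pvGaps fl p.2 rest
      = ((p :: rest).zip rest).map (fun q => PySem.List.slice fl (some q.1.2) (some q.2.1)) := by
  induction rest with
  | nil => simp [pvGaps]
  | cons q r ih =>
    intro p
    obtain ⟨s, e⟩ := q
    simp [pvGaps, ih ⟨s, e⟩]

lemma pv_end_last (offs : List (Int × Int)) : ∀ (cur : Int) (h : offs ≠ []),
    pvEnd cur offs = (offs.getLast h).2 := by
  induction offs with
  | nil => simp
  | cons q r ih =>
    intro cur h
    obtain ⟨s, e⟩ := q
    cases r with
    | nil => simp [pvEnd]
    | cons q2 r2 =>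
      rw [show pvEnd cur ((s, e) :: q2 :: r2) = pvEnd e (q2 :: r2) from rfl, ih e (by simp)]
      congr 1

lemma pv_slice_len {a : Type} (xs : List a) (i : Int) :
    PySem.List.slice xs (some i) (some (xs.length : Int)) = PySem.List.slice xs (some i) none := by
  simp only [PySem.List.slice, PySem.List.clampIdx]
  split_ifs <;> simp <;> omega

-- canonical value both ports reduce to, given the head/tail of the group list
def pvCanon (fl : List Int) (oriLen : Int) (g0 : Int × Int) (rest : List (Int × Int)) :
    List (List Int) × List (List Int) × Bool × Bool :=
  ((if g0.1 = 0 then [] else [PySem.List.slice fl (some 0) (some g0.1)]) ++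
     pvGaps fl (g0.1 + g0.2) (pvOffs rest g0.2) ++
     (if ((g0 :: rest).getLast (by simp)).1 ≥ oriLen then []
      else [PySem.List.slice fl (some (pvEnd (g0.1 + g0.2) (pvOffs rest g0.2))) none]),
   PySem.List.slice fl (some g0.1) (some (g0.1 + g0.2)) ::
     (pvOffs rest g0.2).map (fun p => PySem.List.slice fl (some p.1) (some p.2)),
   decide (g0.1 = 0), decide (((g0 :: rest).getLast (by simp)).1 ≥ oriLen))

lemma pv_ins (fl : List Int) (L : List (Int × Int)) :
    List.foldl (fun acc i => acc ++
        [PySem.List.slice fl (some (PySem.List.pyGetD L i ((0 : Int), (0 : Int))).1)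
          (some (PySem.List.pyGetD L i ((0 : Int), (0 : Int))).2)]) []
      (PySem.List.pyRange 0 (L.length : Int) 1)
      = L.map (fun p => PySem.List.slice fl (some p.1) (some p.2)) := by
  rw [PySem.List.foldl_pyRange_zero_pyGetD' L ((0 : Int), (0 : Int))
    (fun acc p => acc ++ [PySem.List.slice fl (some p.1) (some p.2)]) []]
  rw [PySem.List.foldl_append_singleton_eq_map, List.nil_append]

lemma pv_mid (fl : List Int) (L : List (Int × Int)) :
    List.foldl (fun acc i => acc ++
        [PySem.List.slice fl (some (PySem.List.pyGetD L i ((0 : Int), (0 : Int))).2)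
          (some (PySem.List.pyGetD L (i + 1) ((0 : Int), (0 : Int))).1)]) []
      (PySem.List.pyRange 0 ((L.length : Int) - 1) 1)
      = (L.zip L.tail).map (fun q => PySem.List.slice fl (some q.1.2) (some q.2.1)) := by
  rw [PySem.List.foldl_append_singleton_eq_map, List.nil_append]
  rw [PySem.List.pyRange_one, List.map_map]
  have hn : ((L.length : Int) - 1 - 0).toNat = L.length - 1 := by omega
  rw [hn, ← pv_adjMap L ((0 : Int), (0 : Int)), List.map_map]
  apply List.map_congr_left
  intro k hk
  simp only [Function.comp_apply, zero_add]
  have e2 : ((k : Nat) : Int) + 1 = ((k + 1 : Nat) : Int) := by push_cast; ring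
  rw [e2]
  simp only [PySem.List.pyGetD_natCast]

-- offset table helper of A equals the structural pvOffs
lemma pv_offs_loop (gs : List (Int × Int)) : ∀ (acc : List (Int × Int)) (a : Int),
    gs.foldl (fun (st : List (Int × Int) × Int) p =>
        (st.1 ++ [(p.1 + st.2, p.1 + st.2 + p.2)], st.2 + p.2)) (acc, a)
      = (acc ++ pvOffs gs a, a + (gs.map Prod.snd).sum) := by
  induction gs with
  | nil => simp [pvOffs]
  | cons p r ih =>
    intro acc a
    obtain ⟨v, c⟩ := p
    simp only [List.foldl_cons, List.map_cons, List.sum_cons, pvOffs, ih]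
    simp [add_assoc]

lemma pv_offset_eq (gs : List (Int × Int)) : pvGetListInsertOffset gs = pvOffs gs 0 := by
  unfold pvGetListInsertOffset
  rw [PySem.List.foldl_pyRange_zero_pyGetD' gs (0, 0)
    (fun (st : List (Int × Int) × Int) p => (st.1 ++ [(p.1 + st.2, p.1 + st.2 + p.2)], st.2 + p.2)) ([], 0)]
  rw [pv_offs_loop]
  simp

lemma pv_A_char (fl xs : List Int) (g0 : Int × Int) (rest : List (Int × Int))
    (hG : pvGetListInsertCount xs = g0 :: rest) :
    getListGroupAfterInsert fl xs
      = pvCanon fl ((fl.length : Int) - (xs.length : Int)) g0 rest := by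
  unfold getListGroupAfterInsert
  rw [hG]
  dsimp only
  rw [pv_offset_eq]
  have hoff : pvOffs (g0 :: rest) 0 = (g0.1, g0.1 + g0.2) :: pvOffs rest g0.2 := by
    obtain ⟨v, c⟩ := g0; simp [pvOffs]
  rw [hoff]
  rw [pv_ins fl ((g0.1, g0.1 + g0.2) :: pvOffs rest g0.2),
    pv_mid fl ((g0.1, g0.1 + g0.2) :: pvOffs rest g0.2)]
  simp only [List.tail_cons]
  rw [← pv_gaps_zip fl (pvOffs rest g0.2) (g0.1, g0.1 + g0.2)]
  have h2 : PySem.List.pyGetD (g0 :: rest) ((((g0 :: rest).length : Nat) : Int) - 1) ((0 : Int), (0 : Int))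
      = (g0 :: rest).getLast (by simp) := by
    rw [pv_getD_last (g0 :: rest) ((0 : Int), (0 : Int)) (by simp)]
    exact PySem.List.pyGetD_neg_one _ _ (by simp)
  have h4 : PySem.List.pyGetD ((g0.1, g0.1 + g0.2) :: pvOffs rest g0.2)
        (((((g0.1, g0.1 + g0.2) :: pvOffs rest g0.2).length : Nat) : Int) - 1) ((0 : Int), (0 : Int))
      = ((g0.1, g0.1 + g0.2) :: pvOffs rest g0.2).getLast (by simp) := by
    rw [pv_getD_last _ _ (by simp)]
    exact PySem.List.pyGetD_neg_one _ _ (by simp)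
  rw [h2, h4]
  have hend : (((g0.1, g0.1 + g0.2) :: pvOffs rest g0.2).getLast (by simp)).2
      = pvEnd (g0.1 + g0.2) (pvOffs rest g0.2) := by
    cases hr : pvOffs rest g0.2 with
    | nil => simp [pvEnd]
    | cons q r =>
      rw [List.getLast_cons (by simp), ← pv_end_last (q :: r) (g0.1 + g0.2) (by simp)]
  rw [hend, pv_slice_len fl, PySem.List.pyGetD_zero_cons, PySem.List.pyGetD_zero_cons]
  unfold pvCanon
  by_cases hp : g0.1 = 0 <;>
    by_cases hq : ((g0 :: rest).getLast (by simp : (g0 :: rest) ≠ [])).1 ≥ (fl.length : Int) - (xs.length : Int) <;>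
    simp [hp, hq]

lemma pv_B_char (fl xs : List Int) (g0 : Int × Int) (rest : List (Int × Int))
    (hpre : xs ≠ []) (hG : pvGetListInsertCount xs = g0 :: rest) :
    getListGroupAfterInsert_alt fl xs
      = pvCanon fl ((fl.length : Int) - (xs.length : Int)) g0 rest := by
  unfold getListGroupAfterInsert_alt
  simp only [PySem.List.slice_from_one]
  have hsim := pv_sim (xs.zip xs.tail) [] 1
  simp only [pvOffs, pvFlat, List.map_nil, List.sum_nil] at hsim
  rw [hsim]
  have hzip0 : pvGroupsZip xs = g0 :: rest := by rw [← pv_groups_eq xs hpre]; exact hG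
  unfold pvGroupsZip at hzip0
  simp only [PySem.List.slice_from_one] at hzip0
  generalize hF : (xs.zip xs.tail).foldl (fun (st : List (Int × Int) × Int) pc =>
      if pc.2 = pc.1 then (st.1, st.2 + 1)
      else if pc.2 > pc.1 then (st.1 ++ [(pc.1, st.2)], 1)
      else st) ([], 1) = F at hzip0 hsim ⊢
  dsimp only
  set last := PySem.List.pyGetD xs (-1) 0 with hlastdef
  set S := (List.map Prod.snd F.1).sum with hSdef
  have key : pvFlat (pvOffs (g0 :: rest) 0) = pvFlat (pvOffs F.1 0) ++ [last + S, last + S + F.2] := by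
    rw [← hzip0, pv_offs_append, pv_flat_append]
    simp [pvFlat]
    exact hSdef.symm
  have hc : (0 :: pvFlat (pvOffs F.1 0)) ++ [last + S, last + S + F.2, ((fl.length : Nat) : Int)]
      = 0 :: (pvFlat (pvOffs (g0 :: rest) 0) ++ [((fl.length : Nat) : Int)]) := by
    rw [key]; simp
  rw [hc]
  have hoff : pvOffs (g0 :: rest) 0 = (g0.1, g0.1 + g0.2) :: pvOffs rest g0.2 := by
    obtain ⟨v, c⟩ := g0; simp [pvOffs]
  rw [hoff, List.tail_cons]
  rw [pv_deal_pieces fl ((g0.1, g0.1 + g0.2) :: pvOffs rest g0.2) 0 ((fl.length : Nat) : Int) [] []]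
  have hg1 : PySem.List.pyGetD (0 :: (pvFlat ((g0.1, g0.1 + g0.2) :: pvOffs rest g0.2) ++ [((fl.length : Nat) : Int)])) 1 0 = g0.1 := by
    simp [pvFlat, pysem]
  rw [hg1]
  dsimp only
  have hE : pvEnd 0 ((g0.1, g0.1 + g0.2) :: pvOffs rest g0.2) = pvEnd (g0.1 + g0.2) (pvOffs rest g0.2) := rfl
  have hGp : pvGaps fl 0 ((g0.1, g0.1 + g0.2) :: pvOffs rest g0.2)
      = PySem.List.slice fl (some 0) (some g0.1) :: pvGaps fl (g0.1 + g0.2) (pvOffs rest g0.2) := rfl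
  rw [hE, hGp, pv_slice_len]
  unfold pvCanon
  simp only [← hzip0, List.getLast_concat]
  by_cases hp : g0.1 = 0 <;> by_cases hq : last ≥ ((fl.length : Nat) : Int) - ((xs.length : Nat) : Int) <;>
    simp [hp, hq, PySem.List.slice_to_neg_one] <;>
    first
      | rfl
      | (rw [← List.cons_append, List.dropLast_concat])

-- ===== VERDICT (by name: the statement is the Claim_ definition above) =====
theorem getListGroupAfterInsert_spec : Claim_equal_getListGroupAfterInsert := by
  intro fl xs hdom hpre
  unfold Spec_getListGroupAfterInsert Pre_getListGroupAfterInsert at *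
  have hGne : pvGetListInsertCount xs ≠ [] := by unfold pvGetListInsertCount; simp
  obtain ⟨g0, rest, hG⟩ := List.exists_cons_of_ne_nil hGne
  rw [pv_A_char fl xs g0 rest hG, pv_B_char fl xs g0 rest hpre hG]
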